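-- pv_equiv track=rewrite | github.com/rafaelos134/Projeto_e_Analise_de_Algoritmos | tp1/teste.py | maxValor
-- ===== SOURCE A (Python) =====
-- def maxValor(G,node):
--     pontos = 0
--
--     for x in G.keys():
--         for y in G[x].keys():
--             if x == node:
--                 if G[x][y][0] != 1:
--                     G[x][y][0] = 1
--                     G[x][y][2] = 2
--                 pontos += G[x][y][2]
--             if x != node:
--                 if y == node:
--                     if G[x][y][0] != 1:
--                         G[x][y][0] = 1
--                         G[x][y][2] = 2
--                     pontos += G[x][y][2]
--
--     return G, pontos
-- ===== SOURCE B (Python) =====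
-- def maxValor(G, node):
--     pontos = 0
--     # pass 1: outgoing edges of `node` (also covers a self-loop, counted once)
--     for e in G.get(node, {}).values():
--         if e[0] != 1:
--             e[0] = 1
--             e[2] = 2
--         pontos += e[2]
--     # pass 2: incoming edges from every other node
--     for x in G:
--         if x != node and node in G[x]:
--             e = G[x][node]
--             if e[0] != 1:
--                 e[0] = 1
--                 e[2] = 2
--             pontos += e[2]
--     return G, pontos
-- ===== Notes on version B (the rewrite author's own statement) =====
-- stated objective: simpler
-- what changed: Instead of A's nested scan over every edge of every row testing x==node / y==node per edge, B does two targeted passes: it processes the outgoing edges via a single G.get(node,{}) lookup, then scans the other rows once, touching only their (unique) `node` entry via a membership test; the per-edge marking/accumulation code is unchanged.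
import Mathlib
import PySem

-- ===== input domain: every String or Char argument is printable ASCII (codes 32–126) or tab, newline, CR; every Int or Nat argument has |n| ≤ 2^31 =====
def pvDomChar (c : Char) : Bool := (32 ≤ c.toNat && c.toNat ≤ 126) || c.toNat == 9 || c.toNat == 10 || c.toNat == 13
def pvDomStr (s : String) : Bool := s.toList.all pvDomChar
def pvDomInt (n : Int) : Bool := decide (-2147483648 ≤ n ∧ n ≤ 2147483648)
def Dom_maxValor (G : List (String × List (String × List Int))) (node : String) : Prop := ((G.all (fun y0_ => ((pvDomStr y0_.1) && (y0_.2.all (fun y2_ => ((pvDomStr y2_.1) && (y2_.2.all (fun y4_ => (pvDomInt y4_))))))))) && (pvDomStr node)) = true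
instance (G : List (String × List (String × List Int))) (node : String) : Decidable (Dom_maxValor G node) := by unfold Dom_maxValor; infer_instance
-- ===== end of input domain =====

-- B re-implements A as two passes (outgoing edges of `node`, then incoming edges) instead of a
-- nested scan over every edge of the graph; equivalence of the RETURN value is what is proved
-- (both Pythons also mutate G in place in the same way).

-- ===== PORT A =====
-- shared edge mutation, both Pythons contain the identical three lines
--   `if e[0] != 1: e[0] = 1; e[2] = 2` and then read `e[2]`;
-- List.set / pyGet?.getD are exact for Python's e[0]=1 / e[2]=2 / e[2] when 3 ≤ e.length,
-- which Pre_ guarantees for every edge these helpers are applied to (otherwise Python raises IndexError).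
def pvMark (e : List Int) : List Int :=
  if PySem.List.pyGet? e 0 ≠ some 1 then (e.set 0 1).set 2 2 else e

def pvVal (e : List Int) : Int := (PySem.List.pyGet? e 2).getD 0

def maxValor (G : List (String × List (String × List Int))) (node : String) : (List (String × List (String × List Int))) × Int :=
  G.foldl
    (fun st xadj =>
      let inner := xadj.2.foldl
        (fun st2 ye =>
          if xadj.1 = node then
            let e := pvMark ye.2
            (st2.1 ++ [(ye.1, e)], st2.2 + pvVal e)
          else if ye.1 = node then
            let e := pvMark ye.2
            (st2.1 ++ [(ye.1, e)], st2.2 + pvVal e)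
          else
            (st2.1 ++ [ye], st2.2))
        (([] : List (String × List Int)), st.2)
      (st.1 ++ [(xadj.1, inner.1)], inner.2))
    (([] : List (String × List (String × List Int))), (0 : Int))

-- ===== PORT B =====
def maxValor_alt (G : List (String × List (String × List Int))) (node : String) : (List (String × List (String × List Int))) × Int :=
  -- pass 1: iterate over G.get(node, {}).values(), mutating each edge in place and accumulating
  let adj0 := (PySem.Dict.mk G).getD node []
  let p1 := adj0.foldl (fun p ye => p + pvVal (pvMark ye.2)) (0 : Int)
  -- the in-place mutation of the `node` entry's edges (a Python dict has unique keys)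
  let G1 := G.map (fun xadj => if xadj.1 = node then (xadj.1, xadj.2.map (fun ye => (ye.1, pvMark ye.2))) else xadj)
  -- pass 2: for x in G: if x != node and node in G[x]: mutate G[x][node] and accumulate
  G1.foldl
    (fun st xadj =>
      if xadj.1 ≠ node ∧ (PySem.Dict.mk xadj.2).contains node then
        (st.1 ++ [(xadj.1, ((PySem.Dict.mk xadj.2).modify node [] pvMark).items)],
         st.2 + pvVal (pvMark ((PySem.Dict.mk xadj.2).getD node [])))
      else
        (st.1 ++ [xadj], st.2))
    (([] : List (String × List (String × List Int))), p1)

-- ===== PRECONDITION & SPEC =====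
-- Pre_ excludes (a) association lists with duplicate keys at either level — those do not represent
-- a Python dict input at all — and (b) incident edges (x = node or y = node) whose value list has
-- fewer than 3 elements, on which Python A raises IndexError.
def Pre_maxValor (G : List (String × List (String × List Int))) (node : String) : Prop :=
  (G.map Prod.fst).Nodup ∧
  ∀ p ∈ G, (p.2.map Prod.fst).Nodup ∧ ∀ q ∈ p.2, (p.1 = node ∨ q.1 = node) → 3 ≤ q.2.length
instance (G : List (String × List (String × List Int))) (node : String) : Decidable (Pre_maxValor G node) := by unfold Pre_maxValor; infer_instance

def pvWitness_maxValor : (List (String × List (String × List Int))) × String :=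
  ([("a", [("b", [0, 5, 7]), ("a", [1, 0, 4])]), ("b", [("a", [0, 0, 0]), ("c", [9, 9, 9])]), ("c", [])], "a")

def Spec_maxValor (G : List (String × List (String × List Int))) (node : String) (out : (List (String × List (String × List Int))) × Int) : Prop := out = maxValor_alt G node
instance (G : List (String × List (String × List Int))) (node : String) (out : (List (String × List (String × List Int))) × Int) : Decidable (Spec_maxValor G node out) := by unfold Spec_maxValor; infer_instance

-- ===== CLAIM (what is proved, stated in full; the proofs are below) =====
def Claim_equal_maxValor : Prop := ∀ (G : List (String × List (String × List Int))) (node : String), Dom_maxValor G node → Pre_maxValor G node → Spec_maxValor G node (maxValor G node)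

-- ===== LEMMAS AND PROOFS =====

-- closed forms of the loops (proof-side only)
def pvEA (node x : String) (adj : List (String × List Int)) : List (String × List Int) :=
  adj.map (fun ye => if x = node ∨ ye.1 = node then (ye.1, pvMark ye.2) else ye)

def pvPA (node x : String) (adj : List (String × List Int)) : Int :=
  (adj.map (fun ye => if x = node ∨ ye.1 = node then pvVal (pvMark ye.2) else 0)).sum

def pvPre1 (node : String) (xadj : String × List (String × List Int)) : String × List (String × List Int) :=
  if xadj.1 = node then (xadj.1, xadj.2.map (fun ye => (ye.1, pvMark ye.2))) else xadj

def pvGB (node : String) (xadj : String × List (String × List Int)) : String × List (String × List Int) :=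
  if xadj.1 ≠ node ∧ (PySem.Dict.mk xadj.2).contains node then
    (xadj.1, ((PySem.Dict.mk xadj.2).modify node [] pvMark).items)
  else xadj

def pvVB (node : String) (xadj : String × List (String × List Int)) : Int :=
  if xadj.1 ≠ node ∧ (PySem.Dict.mk xadj.2).contains node then
    pvVal (pvMark ((PySem.Dict.mk xadj.2).getD node []))
  else 0

theorem pvInnerA (node x : String) (adj : List (String × List Int)) :
    ∀ (acc : List (String × List Int)) (p : Int),
      adj.foldl
        (fun st2 ye =>
          if x = node then
            let e := pvMark ye.2
            (st2.1 ++ [(ye.1, e)], st2.2 + pvVal e)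
          else if ye.1 = node then
            let e := pvMark ye.2
            (st2.1 ++ [(ye.1, e)], st2.2 + pvVal e)
          else
            (st2.1 ++ [ye], st2.2)) (acc, p)
      = (acc ++ pvEA node x adj, p + pvPA node x adj) := by
  induction adj with
  | nil => simp [pvEA, pvPA]
  | cons ye t ih =>
    intro acc p
    rw [List.foldl_cons]
    by_cases hx : x = node
    · rw [show (if x = node then
            ((acc, p).1 ++ [(ye.1, pvMark ye.2)], (acc, p).2 + pvVal (pvMark ye.2))
          else if ye.1 = node then
            ((acc, p).1 ++ [(ye.1, pvMark ye.2)], (acc, p).2 + pvVal (pvMark ye.2))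
          else ((acc, p).1 ++ [ye], (acc, p).2))
          = (acc ++ [(ye.1, pvMark ye.2)], p + pvVal (pvMark ye.2)) from by simp [hx]]
      rw [ih]
      simp [pvEA, pvPA, hx]
      ring
    · by_cases hy : ye.1 = node
      · rw [show (if x = node then
              ((acc, p).1 ++ [(ye.1, pvMark ye.2)], (acc, p).2 + pvVal (pvMark ye.2))
            else if ye.1 = node then
              ((acc, p).1 ++ [(ye.1, pvMark ye.2)], (acc, p).2 + pvVal (pvMark ye.2))
            else ((acc, p).1 ++ [ye], (acc, p).2))
            = (acc ++ [(ye.1, pvMark ye.2)], p + pvVal (pvMark ye.2)) from by simp [hx, hy]]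
        rw [ih]
        simp [pvEA, pvPA, hx, hy]
        ring
      · rw [show (if x = node then
              ((acc, p).1 ++ [(ye.1, pvMark ye.2)], (acc, p).2 + pvVal (pvMark ye.2))
            else if ye.1 = node then
              ((acc, p).1 ++ [(ye.1, pvMark ye.2)], (acc, p).2 + pvVal (pvMark ye.2))
            else ((acc, p).1 ++ [ye], (acc, p).2))
            = (acc ++ [ye], p) from by simp [hx, hy]]
        rw [ih]
        simp [pvEA, pvPA, hx, hy]

theorem pvA_closed (G : List (String × List (String × List Int))) (node : String) :
    maxValor G node =
      (G.map (fun xadj => (xadj.1, pvEA node xadj.1 xadj.2)),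
       (G.map (fun xadj => pvPA node xadj.1 xadj.2)).sum) := by
  unfold maxValor
  suffices h : ∀ (acc : List (String × List (String × List Int))) (p : Int),
      G.foldl
        (fun st xadj =>
          let inner := xadj.2.foldl
            (fun st2 ye =>
              if xadj.1 = node then
                let e := pvMark ye.2
                (st2.1 ++ [(ye.1, e)], st2.2 + pvVal e)
              else if ye.1 = node then
                let e := pvMark ye.2
                (st2.1 ++ [(ye.1, e)], st2.2 + pvVal e)
              else
                (st2.1 ++ [ye], st2.2))
            (([] : List (String × List Int)), st.2)
          (st.1 ++ [(xadj.1, inner.1)], inner.2)) (acc, p)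
      = (acc ++ G.map (fun xadj => (xadj.1, pvEA node xadj.1 xadj.2)),
         p + (G.map (fun xadj => pvPA node xadj.1 xadj.2)).sum) by
    simpa using h [] 0
  induction G with
  | nil => simp
  | cons xadj t ih =>
    intro acc p
    simp only [List.foldl_cons, pvInnerA node xadj.1 xadj.2]
    simp [ih, add_assoc]

theorem pvPass2 (node : String) (l : List (String × List (String × List Int))) :
    ∀ (acc : List (String × List (String × List Int))) (p : Int),
      l.foldl
        (fun st xadj =>
          if xadj.1 ≠ node ∧ (PySem.Dict.mk xadj.2).contains node then
            (st.1 ++ [(xadj.1, ((PySem.Dict.mk xadj.2).modify node [] pvMark).items)],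
             st.2 + pvVal (pvMark ((PySem.Dict.mk xadj.2).getD node [])))
          else
            (st.1 ++ [xadj], st.2)) (acc, p)
      = (acc ++ l.map (pvGB node), p + (l.map (pvVB node)).sum) := by
  induction l with
  | nil => simp
  | cons xadj t ih =>
    intro acc p
    rw [List.foldl_cons]
    by_cases hc : xadj.1 ≠ node ∧ (PySem.Dict.mk xadj.2).contains node
    · rw [show (if xadj.1 ≠ node ∧ (PySem.Dict.mk xadj.2).contains node then
            ((acc, p).1 ++ [(xadj.1, ((PySem.Dict.mk xadj.2).modify node [] pvMark).items)],
             (acc, p).2 + pvVal (pvMark ((PySem.Dict.mk xadj.2).getD node [])))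
          else ((acc, p).1 ++ [xadj], (acc, p).2))
          = (acc ++ [(xadj.1, ((PySem.Dict.mk xadj.2).modify node [] pvMark).items)],
             p + pvVal (pvMark ((PySem.Dict.mk xadj.2).getD node []))) from by rw [if_pos hc]]
      rw [ih]
      have hg : pvGB node xadj = (xadj.1, ((PySem.Dict.mk xadj.2).modify node [] pvMark).items) := by
        simp only [pvGB, if_pos hc]
      have hv : pvVB node xadj = pvVal (pvMark ((PySem.Dict.mk xadj.2).getD node [])) := by
        simp only [pvVB, if_pos hc]
      simp [hg, hv]
      ring
    · rw [show (if xadj.1 ≠ node ∧ (PySem.Dict.mk xadj.2).contains node then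
            ((acc, p).1 ++ [(xadj.1, ((PySem.Dict.mk xadj.2).modify node [] pvMark).items)],
             (acc, p).2 + pvVal (pvMark ((PySem.Dict.mk xadj.2).getD node [])))
          else ((acc, p).1 ++ [xadj], (acc, p).2))
          = (acc ++ [xadj], p) from by rw [if_neg hc]]
      rw [ih]
      have hg : pvGB node xadj = xadj := by simp only [pvGB, if_neg hc]
      have hv : pvVB node xadj = 0 := by simp only [pvVB, if_neg hc]
      simp [hg, hv]

-- if `node` is not among the keys, the inner mark/accumulate over adj is the identity / 0
theorem pvEA_no_node (node x : String) (hx : x ≠ node) (adj : List (String × List Int))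
    (h : node ∉ adj.map Prod.fst) :
    pvEA node x adj = adj := by
  unfold pvEA
  conv_rhs => rw [← List.map_id adj]
  apply List.map_congr_left
  intro ye hye
  have hne : ye.1 ≠ node := fun he => h (he ▸ List.mem_map_of_mem hye)
  simp [hx, hne]

theorem pvPA_no_node (node x : String) (hx : x ≠ node) (adj : List (String × List Int))
    (h : node ∉ adj.map Prod.fst) :
    pvPA node x adj = 0 := by
  unfold pvPA
  have heq : adj.map (fun ye => if x = node ∨ ye.1 = node then pvVal (pvMark ye.2) else 0)
      = adj.map (fun _ => (0 : Int)) := by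
    apply List.map_congr_left
    intro ye hye
    have hne : ye.1 ≠ node := fun he => h (he ▸ List.mem_map_of_mem hye)
    simp [hx, hne]
  simp [heq]

theorem pvModify_items (node : String) (adj : List (String × List Int))
    (hct : (PySem.Dict.mk adj).contains node) :
    ((PySem.Dict.mk adj).modify node [] pvMark).items
      = adj.map (fun p => if p.1 == node then (node, pvMark ((PySem.Dict.mk adj).getD node [])) else p) := by
  simp [PySem.Dict.modify, PySem.Dict.insert, hct]

-- the per-entry equivalence for a non-`node` row: marking the (unique) `node` column
-- equals Dict.modify at `node` (first/only match), and the added points match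
theorem pvL1 (node x : String) (hx : x ≠ node) (adj : List (String × List Int))
    (hn : (adj.map Prod.fst).Nodup) :
    pvEA node x adj = (pvGB node (x, adj)).2 ∧ pvPA node x adj = pvVB node (x, adj) := by
  induction adj with
  | nil => simp [pvEA, pvPA, pvGB, pvVB, PySem.Dict.contains, hx]
  | cons ye t ih =>
    simp only [List.map_cons, List.nodup_cons] at hn
    obtain ⟨hnot, hnd⟩ := hn
    by_cases hy : ye.1 = node
    · -- first match: the tail has no `node` key
      have htail : node ∉ t.map Prod.fst := by rwa [hy] at hnot
      have hct : (PySem.Dict.mk (ye :: t)).contains node = true := by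
        simp [PySem.Dict.contains, hy]
      have hget : (PySem.Dict.mk (ye :: t)).getD node [] = ye.2 := by
        simp [PySem.Dict.getD, PySem.Dict.get?, hy]
      constructor
      · rw [show pvEA node x (ye :: t) = (ye.1, pvMark ye.2) :: pvEA node x t by
          simp [pvEA, hy]]
        rw [pvEA_no_node node x hx t htail]
        rw [show (pvGB node (x, (ye :: t))).2 = ((PySem.Dict.mk (ye :: t)).modify node [] pvMark).items from by
          simp [pvGB, hx, hct]]
        rw [pvModify_items node (ye :: t) hct, hget]
        simp only [List.map_cons, if_pos (show (ye.1 == node) = true by simp [hy])]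
        rw [← hy]
        congr 1
        conv_lhs => rw [← List.map_id t]
        apply List.map_congr_left
        intro q hq
        have hne : q.1 ≠ node := fun he => htail (he ▸ List.mem_map_of_mem hq)
        have hne' : q.1 ≠ ye.1 := by rw [hy]; exact hne
        simp [hne']
      · rw [show pvPA node x (ye :: t) = pvVal (pvMark ye.2) + pvPA node x t by
          simp [pvPA, hy]]
        rw [pvPA_no_node node x hx t htail]
        simp [pvVB, hx, hct, hget]
    · obtain ⟨ih1, ih2⟩ := ih hnd
      have hbe : (ye.1 == node) = false := by simp [hy]
      have hcc : (PySem.Dict.mk (ye :: t)).contains node = (PySem.Dict.mk t).contains node := by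
        simp [PySem.Dict.contains, hbe]
      have hgg : (PySem.Dict.mk (ye :: t)).getD node [] = (PySem.Dict.mk t).getD node [] := by
        simp [PySem.Dict.getD, PySem.Dict.get?, hbe]
      by_cases hct : (PySem.Dict.mk t).contains node = true
      · constructor
        · rw [show pvEA node x (ye :: t) = ye :: pvEA node x t by simp [pvEA, hx, hy]]
          rw [ih1]
          have hct' : (PySem.Dict.mk (ye :: t)).contains node = true := by rw [hcc]; exact hct
          rw [show (pvGB node (x, (ye :: t))).2 = ((PySem.Dict.mk (ye :: t)).modify node [] pvMark).items from by
            simp [pvGB, hx, hct']]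
          rw [show (pvGB node (x, t)).2 = ((PySem.Dict.mk t).modify node [] pvMark).items from by
            simp [pvGB, hx, hct]]
          rw [pvModify_items node (ye :: t) hct', pvModify_items node t hct, hgg]
          simp [hy]
        · rw [show pvPA node x (ye :: t) = 0 + pvPA node x t by simp [pvPA, hx, hy]]
          rw [ih2]
          have hct' : (PySem.Dict.mk (ye :: t)).contains node = true := by rw [hcc]; exact hct
          simp [pvVB, hx, hct, hct', hgg]
      · have hct' : ¬ (PySem.Dict.mk (ye :: t)).contains node = true := by rw [hcc]; exact hct
        constructor
        · rw [show pvEA node x (ye :: t) = ye :: pvEA node x t by simp [pvEA, hx, hy]]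
          rw [ih1]
          simp [pvGB, hx, hct, hct']
        · rw [show pvPA node x (ye :: t) = 0 + pvPA node x t by simp [pvPA, hx, hy]]
          rw [ih2]
          simp [pvVB, hx, hct, hct']

-- main induction: A's single nested pass equals B's two passes, given unique keys
theorem pvMain (node : String) :
    ∀ (G : List (String × List (String × List Int))),
      (G.map Prod.fst).Nodup →
      (∀ p ∈ G, (p.2.map Prod.fst).Nodup) →
      G.map (fun xadj => (xadj.1, pvEA node xadj.1 xadj.2))
        = (G.map (pvPre1 node)).map (pvGB node)
      ∧ (G.map (fun xadj => pvPA node xadj.1 xadj.2)).sum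
        = (((PySem.Dict.mk G).getD node []).map (fun ye => pvVal (pvMark ye.2))).sum
          + ((G.map (pvPre1 node)).map (pvVB node)).sum := by
  intro G
  induction G with
  | nil => simp [PySem.Dict.getD, PySem.Dict.get?]
  | cons xadj t ih =>
    intro hnd hinner
    simp only [List.map_cons, List.nodup_cons] at hnd
    obtain ⟨hnot, hndt⟩ := hnd
    have hinner_t : ∀ p ∈ t, (p.2.map Prod.fst).Nodup := fun p hp => hinner p (List.mem_cons_of_mem _ hp)
    have hinner_h : (xadj.2.map Prod.fst).Nodup := hinner xadj (List.mem_cons_self)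
    by_cases hx : xadj.1 = node
    · -- head is the `node` row: pass 1 handles it; the tail has no `node` key
      have htail : ∀ p ∈ t, p.1 ≠ node := by
        intro p hp he
        exact hnot (by rw [hx]; exact he ▸ List.mem_map_of_mem hp)
      constructor
      · simp only [List.map_cons]
        congr 1
        · simp [pvEA, pvPre1, pvGB, hx]
        · -- tail: pvPre1 is the identity, per-row lemma pvL1
          rw [show (t.map (pvPre1 node)) = t from by
            conv_rhs => rw [← List.map_id t]
            apply List.map_congr_left
            intro p hp
            simp [pvPre1, htail p hp]]
          apply List.map_congr_left
          intro p hp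
          have h1 : (pvGB node p).1 = p.1 := by unfold pvGB; split <;> rfl
          exact Prod.ext h1.symm (pvL1 node p.1 (htail p hp) p.2 (hinner_t p hp)).1
      · simp only [List.map_cons, List.sum_cons]
        have hget : (PySem.Dict.mk (xadj :: t)).getD node [] = xadj.2 := by
          simp [PySem.Dict.getD, PySem.Dict.get?, hx]
        rw [hget]
        have hhead : pvPA node xadj.1 xadj.2 = (xadj.2.map (fun ye => pvVal (pvMark ye.2))).sum := by
          unfold pvPA
          congr 1
          apply List.map_congr_left
          intro ye _
          simp [hx]
        have hheadv : pvVB node (pvPre1 node xadj) = 0 := by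
          simp [pvVB, pvPre1, hx]
        rw [hhead, hheadv]
        have htsum : (t.map (fun xadj => pvPA node xadj.1 xadj.2)).sum
            = ((t.map (pvPre1 node)).map (pvVB node)).sum := by
          rw [show (t.map (pvPre1 node)) = t from by
            conv_rhs => rw [← List.map_id t]
            apply List.map_congr_left
            intro p hp
            simp [pvPre1, htail p hp]]
          apply congrArg List.sum
          apply List.map_congr_left
          intro p hp
          exact (pvL1 node p.1 (htail p hp) p.2 (hinner_t p hp)).2
        rw [htsum]; ring
    · obtain ⟨ih1, ih2⟩ := ih hndt hinner_t
      constructor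
      · simp only [List.map_cons, ih1]
        congr 1
        · rw [show pvPre1 node xadj = xadj from by simp [pvPre1, hx]]
          have h1 : (pvGB node xadj).1 = xadj.1 := by unfold pvGB; split <;> rfl
          exact Prod.ext h1.symm (pvL1 node xadj.1 hx xadj.2 hinner_h).1
      · simp only [List.map_cons, List.sum_cons]
        have hget : (PySem.Dict.mk (xadj :: t)).getD node [] = (PySem.Dict.mk t).getD node [] := by
          simp [PySem.Dict.getD, PySem.Dict.get?, hx]
        rw [hget, ih2]
        have hhead : pvPA node xadj.1 xadj.2 = pvVB node (pvPre1 node xadj) := by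
          rw [show pvPre1 node xadj = xadj by simp [pvPre1, hx]]
          exact (pvL1 node xadj.1 hx xadj.2 hinner_h).2
        rw [hhead]; ring

theorem pvB_closed (G : List (String × List (String × List Int))) (node : String) :
    maxValor_alt G node =
      ((G.map (pvPre1 node)).map (pvGB node),
       (((PySem.Dict.mk G).getD node []).map (fun ye => pvVal (pvMark ye.2))).sum
         + ((G.map (pvPre1 node)).map (pvVB node)).sum) := by
  unfold maxValor_alt
  rw [pvPass2]
  have hsum := PySem.List.foldl_add (l := (PySem.Dict.mk G).getD node [])
    (g := fun ye => pvVal (pvMark ye.2)) (a := 0)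
  simp only [zero_add] at hsum
  rw [hsum]
  simp only [List.map_map]
  rfl

-- ===== VERDICT (by name: the statement is the Claim_ definition above) =====
theorem maxValor_spec : Claim_equal_maxValor := by
  intro G node _hdom hpre
  obtain ⟨hnd, hrows⟩ := hpre
  have hinner : ∀ p ∈ G, (p.2.map Prod.fst).Nodup := fun p hp => (hrows p hp).1
  unfold Spec_maxValor
  rw [pvA_closed, pvB_closed]
  obtain ⟨h1, h2⟩ := pvMain node G hnd hinner
  rw [h1, h2]
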